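-- pv_equiv track=rewrite | github.com/SYNTRIAD/digit-dynamics | NL/src/pipeline_dsl.py | digit_gcd
-- ===== SOURCE A (Python) =====
-- import math
--
-- def digit_gcd(n: int) -> int:
--     digits = [int(d) for d in str(abs(n)) if d != '0']
--     if not digits:
--         return 0
--     result = digits[0]
--     for d in digits[1:]:
--         result = math.gcd(result, d)
--     return result
-- ===== SOURCE B (Python) =====
-- def digit_gcd(n: int) -> int:
--     digits = [int(d) for d in str(abs(n)) if d != '0']
--     if not digits:
--         return 0
--     # each digit is 1..9, so the gcd lies in 1..9: search divisors 9 down to 2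
--     for g in range(9, 1, -1):
--         if all(d % g == 0 for d in digits):
--             return g
--     return 1
-- ===== Notes on version B (the rewrite author's own statement) =====
-- stated objective: alternative
-- what changed: Replaces the Euclidean gcd fold over the nonzero digits by a bounded divisor search: since every nonzero digit is 1..9, B returns the first g in 9..2 dividing all digits, else 1 (0 when there are no nonzero digits).
import Mathlib
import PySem

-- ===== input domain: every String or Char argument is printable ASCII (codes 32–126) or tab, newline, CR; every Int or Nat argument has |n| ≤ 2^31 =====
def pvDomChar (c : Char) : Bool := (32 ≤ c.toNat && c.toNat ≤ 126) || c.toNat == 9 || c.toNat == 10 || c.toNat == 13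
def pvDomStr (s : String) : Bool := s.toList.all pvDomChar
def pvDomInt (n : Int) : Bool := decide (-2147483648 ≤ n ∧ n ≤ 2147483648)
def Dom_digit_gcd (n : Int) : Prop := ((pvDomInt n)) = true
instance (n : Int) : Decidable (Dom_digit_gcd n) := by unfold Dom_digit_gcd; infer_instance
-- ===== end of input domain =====

-- B replaces A's left fold of math.gcd over the nonzero digits by a bounded divisor
-- search over 9..2 (each nonzero digit is 1..9, so the gcd lies in 1..9); objective: alternative.

-- ===== PORT A =====
-- shared helper: '[int(d) for d in str(abs(n)) if d != '0']' — this comprehension is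
-- character-for-character identical in A and B, so both ports use it.
-- 'int(d)' is PySem.Int.ofChars? on the one-character string; the getD 0 default is
-- unreachable (every character of str(abs(n)) is a decimal digit).
def pvDigits (n : Int) : List Int :=
  ((PySem.Int.toChars ((n.natAbs : Nat) : Int)).filter (fun c => c != '0')).map
    (fun c => (PySem.Int.ofChars? [c]).getD 0)

def digit_gcd (n : Int) : Int :=
  match pvDigits n with
  | [] => 0
  | d :: rest => rest.foldl (fun r x => ((Int.gcd r x : Nat) : Int)) d

-- ===== PORT B =====
-- 'for g in range(9, 1, -1): if all(d % g == 0 for d in digits): return g' then 'return 1'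
def pvSearch (ds : List Int) : List Int → Int
  | [] => 1
  | g :: gs => if ds.all (fun d => PySem.Int.mod d g == 0) then g else pvSearch ds gs

def digit_gcd_alt (n : Int) : Int :=
  let ds := pvDigits n
  if ds.isEmpty then 0 else pvSearch ds (PySem.List.pyRange 9 1 (-1))

-- ===== PRECONDITION & SPEC =====
def Spec_digit_gcd (n : Int) (out : Int) : Prop := out = digit_gcd_alt n
instance (n : Int) (out : Int) : Decidable (Spec_digit_gcd n out) := by unfold Spec_digit_gcd; infer_instance

-- ===== CLAIM (what is proved, stated in full; the proofs are below) =====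
def Claim_equal_digit_gcd : Prop := ∀ (n : Int), Dom_digit_gcd n → Spec_digit_gcd n (digit_gcd n)

-- ===== LEMMAS AND PROOFS =====

-- every character produced by Nat.toDigits 10 is a decimal digit
theorem pv_digitChar_mem (d : Nat) (h : d < 10) :
    Nat.digitChar d ∈ ['0','1','2','3','4','5','6','7','8','9'] := by
  interval_cases d <;> decide

theorem pv_toDigitsCore_mem : ∀ (f n : Nat) (l : List Char),
    (∀ c ∈ l, c ∈ ['0','1','2','3','4','5','6','7','8','9']) →
    ∀ c ∈ Nat.toDigitsCore 10 f n l, c ∈ ['0','1','2','3','4','5','6','7','8','9'] := by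
  intro f
  induction f with
  | zero => intro n l hl; simpa [Nat.toDigitsCore] using hl
  | succ f ih =>
    intro n l hl c hc
    simp only [Nat.toDigitsCore] at hc
    split at hc
    · rcases List.mem_cons.mp hc with h | h
      · exact h ▸ pv_digitChar_mem _ (Nat.mod_lt _ (by omega))
      · exact hl _ h
    · refine ih _ _ ?_ _ hc
      intro c' hc'
      rcases List.mem_cons.mp hc' with h | h
      · exact h ▸ pv_digitChar_mem _ (Nat.mod_lt _ (by omega))
      · exact hl _ h

theorem pv_toChars_mem (m : Nat) :
    ∀ c ∈ PySem.Int.toChars (m : Int), c ∈ ['0','1','2','3','4','5','6','7','8','9'] := by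
  intro c hc
  simp only [PySem.Int.toChars] at hc
  rw [if_neg (by omega), Int.toNat_natCast] at hc
  exact pv_toDigitsCore_mem _ _ [] (by simp) c hc

-- every element of pvDigits n is between 1 and 9
theorem pv_pvDigits_bounds (n : Int) : ∀ x ∈ pvDigits n, 1 ≤ x ∧ x ≤ 9 := by
  intro x hx
  simp only [pvDigits, List.mem_map, List.mem_filter] at hx
  obtain ⟨c, ⟨hcm, hcne⟩, hval⟩ := hx
  have hd := pv_toChars_mem n.natAbs c hcm
  have hne : c ≠ '0' := by simpa using hcne
  fin_cases hd <;> simp_all <;> subst hval <;> decide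

-- A's fold: it divides every digit
theorem pv_fold_dvd : ∀ (rest : List Int) (d : Int),
    (rest.foldl (fun r x => ((Int.gcd r x : Nat) : Int)) d ∣ d) ∧
    ∀ x ∈ rest, rest.foldl (fun r x => ((Int.gcd r x : Nat) : Int)) d ∣ x := by
  intro rest
  induction rest with
  | nil => exact fun d => ⟨dvd_refl d, by simp⟩
  | cons x rest ih =>
    intro d
    simp only [List.foldl_cons]
    obtain ⟨h1, h2⟩ := ih ((Int.gcd d x : Nat) : Int)
    refine ⟨h1.trans (Int.gcd_dvd_left d x), ?_⟩
    intro y hy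
    rcases List.mem_cons.mp hy with h | h
    · exact h ▸ h1.trans (Int.gcd_dvd_right d x)
    · exact h2 y h

-- A's fold: any common divisor of the digits divides it
theorem pv_fold_greatest : ∀ (rest : List Int) (d g : Int), g ∣ d →
    (∀ x ∈ rest, g ∣ x) → g ∣ rest.foldl (fun r x => ((Int.gcd r x : Nat) : Int)) d := by
  intro rest
  induction rest with
  | nil => exact fun d g h _ => h
  | cons x rest ih =>
    intro d g hd hrest
    simp only [List.foldl_cons]
    refine ih _ g ?_ (fun y hy => hrest y (List.mem_cons_of_mem _ hy))
    have hx := hrest x (List.mem_cons_self ..)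
    have hn : g.natAbs ∣ Int.gcd d x :=
      Nat.dvd_gcd (Int.natAbs_dvd_natAbs.mpr hd) (Int.natAbs_dvd_natAbs.mpr hx)
    exact Int.natAbs_dvd.mp (Int.natCast_dvd_natCast.mpr hn)

-- A's fold: positive when the seed is positive
theorem pv_fold_pos : ∀ (rest : List Int) (d : Int), 1 ≤ d →
    1 ≤ rest.foldl (fun r x => ((Int.gcd r x : Nat) : Int)) d := by
  intro rest
  induction rest with
  | nil => exact fun d h => h
  | cons x rest ih =>
    intro d hd
    simp only [List.foldl_cons]
    refine ih _ ?_
    have : Int.gcd d x ≠ 0 := by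
      simp only [ne_eq, Int.gcd_eq_zero_iff, not_and]
      intro h0; omega
    omega

-- the 'all(d % g == 0 for d in digits)' test is common divisibility (for g ≥ 1)
theorem pv_check_iff (ds : List Int) (g : Int) (_hg : 1 ≤ g) :
    (ds.all (fun d => PySem.Int.mod d g == 0) = true) ↔ ∀ d ∈ ds, g ∣ d := by
  simp only [List.all_eq_true, beq_iff_eq]
  constructor
  · intro h d hd; exact (PySem.Int.mod_eq_zero_iff_dvd d g).mp (h d hd)
  · intro h d hd; exact (PySem.Int.mod_eq_zero_iff_dvd d g).mpr (h d hd)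

-- the countdown search over range(k, 1, -1) with fall-through 1 returns g when g is the
-- greatest element of 1..k passing the test
theorem pv_search_spec (ds : List Int) : ∀ (k : Nat) (g : Int), 1 ≤ g → g ≤ (k : Int) →
    (ds.all (fun d => PySem.Int.mod d g == 0) = true) →
    (∀ h : Int, g < h → h ≤ (k : Int) → ds.all (fun d => PySem.Int.mod d h == 0) = false) →
    pvSearch ds (PySem.List.pyRange (k : Int) 1 (-1)) = g := by
  intro k
  induction k with
  | zero => intro g h1 h2 _ _; omega
  | succ k ih =>
    intro g h1 h2 hg hmax
    by_cases hk : (k : Nat) = 0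
    · subst hk
      have : g = 1 := by omega
      subst this
      rw [PySem.List.pyRange_neg_one_eq_nil (by omega)]
      rfl
    · rw [show ((k + 1 : Nat) : Int) = (k : Int) + 1 by push_cast; ring,
          PySem.List.pyRange_neg_one_cons (by omega)]
      by_cases heq : g = (k : Int) + 1
      · subst heq
        simp only [pvSearch, hg, if_true]
      · have hlt : g ≤ (k : Int) := by omega
        have hfail := hmax ((k : Int) + 1) (by omega) (by push_cast; omega)
        simp only [pvSearch, hfail, Bool.false_eq_true, if_false,
          show (k : Int) + 1 - 1 = (k : Int) by ring]
        exact ih g h1 hlt hg (fun h hh1 hh2 => hmax h hh1 (by omega))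

-- ===== VERDICT (by name: the statement is the Claim_ definition above) =====
theorem digit_gcd_spec : Claim_equal_digit_gcd := by
  intro n _
  unfold Spec_digit_gcd digit_gcd digit_gcd_alt
  cases hds : pvDigits n with
  | nil => simp
  | cons d rest =>
    have hbounds := pv_pvDigits_bounds n
    rw [hds] at hbounds
    have hd1 : 1 ≤ d := (hbounds d (List.mem_cons_self ..)).1
    have hd9 : d ≤ 9 := (hbounds d (List.mem_cons_self ..)).2
    set g := rest.foldl (fun r x => ((Int.gcd r x : Nat) : Int)) d with hgdef
    obtain ⟨hgd, hgrest⟩ := pv_fold_dvd rest d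
    have hg1 : 1 ≤ g := pv_fold_pos rest d hd1
    have hg9 : g ≤ 9 := le_trans (Int.le_of_dvd (by omega) hgd) hd9
    have hgall : ∀ x ∈ d :: rest, g ∣ x := by
      intro x hx
      rcases List.mem_cons.mp hx with h | h
      · exact h ▸ hgd
      · exact hgrest x h
    simp only [List.isEmpty_cons, Bool.false_eq_true, if_false]
    refine (pv_search_spec (d :: rest) 9 g hg1 (by omega)
      ((pv_check_iff _ g hg1).mpr hgall) ?_).symm
    intro h hh1 hh9
    by_contra hne
    have hall : ∀ x ∈ d :: rest, h ∣ x := by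
      have := (pv_check_iff (d :: rest) h (by omega)).mp
      cases hb : (d :: rest).all (fun x => PySem.Int.mod x h == 0) with
      | false => exact absurd hb hne
      | true => exact this hb
    have hdvd : h ∣ g :=
      pv_fold_greatest rest d h (hall d (List.mem_cons_self ..))
        (fun y hy => hall y (List.mem_cons_of_mem _ hy))
    have := Int.le_of_dvd (by omega) hdvd
    omega
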